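-- pv_equiv track=rewrite | github.com/Chaft92/offre-stage-video-enfants | scripts/_fix_workflow.py | strip_comment_lines
-- ===== SOURCE A (Python) =====
-- def strip_comment_lines(code: str) -> str:
--     lines = code.split('\n')
--     result, prev_blank = [], False
--     for line in lines:
--         if line.strip().startswith('//'):
--             continue
--         blank = line.strip() == ''
--         if blank and prev_blank:
--             continue
--         result.append(line)
--         prev_blank = blank
--     return '\n'.join(result).strip()
-- ===== SOURCE B (Python) =====
-- def strip_comment_lines(code: str) -> str:
--     # pass 1: drop comment lines; pass 2: walk runs, keeping only the first
--     # line of each blank run (verbatim) and every line of a non-blank run.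
--     lines = [l for l in code.split('\n') if not l.strip().startswith('//')]
--     out = []
--     i, n = 0, len(lines)
--     while i < n:
--         if lines[i].strip() == '':
--             out.append(lines[i])
--             while i < n and lines[i].strip() == '':
--                 i += 1
--         else:
--             while i < n and lines[i].strip() != '':
--                 out.append(lines[i])
--                 i += 1
--     return '\n'.join(out).strip()
-- ===== Notes on version B (the rewrite author's own statement) =====
-- stated objective: alternative
-- what changed: Replaces A's single stateful prev_blank loop by two differently-shaped passes: a filter pass removing comment lines, then a run-grouping scan that emits the first line of each blank run and all lines of each non-blank run.
import Mathlib
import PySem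

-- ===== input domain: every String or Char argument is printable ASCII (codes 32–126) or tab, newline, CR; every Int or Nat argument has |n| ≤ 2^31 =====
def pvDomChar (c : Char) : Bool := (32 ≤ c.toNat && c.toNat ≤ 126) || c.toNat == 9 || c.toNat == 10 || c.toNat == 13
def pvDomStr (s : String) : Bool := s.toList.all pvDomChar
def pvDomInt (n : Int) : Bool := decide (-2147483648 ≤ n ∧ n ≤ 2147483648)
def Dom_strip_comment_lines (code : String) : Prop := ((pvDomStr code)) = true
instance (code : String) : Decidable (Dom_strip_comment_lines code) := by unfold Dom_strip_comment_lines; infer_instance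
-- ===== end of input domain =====

-- B replaces A's stateful prev_blank loop by a filter pass followed by a run-grouping pass (alternative decomposition, same cost).

-- ===== PORT A =====
-- the for-loop of A: state = prev_blank, output built in order
def pvLoopA : List String → Bool → List String
  | [], _ => []
  | line :: rest, prev =>
    if PySem.Str.startswith (PySem.Str.strip line) "//" then pvLoopA rest prev
    else
      let blank := PySem.Str.strip line == ""
      if blank && prev then pvLoopA rest prev
      else line :: pvLoopA rest blank

def strip_comment_lines (code : String) : String :=
  PySem.Str.strip (PySem.Str.join "\n" (pvLoopA ((PySem.Str.split? code "\n").getD []) false))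

-- ===== PORT B =====
def pvIsBlank (l : String) : Bool := PySem.Str.strip l == ""

-- the run-grouping pass of B: first line of a blank run, every line of a non-blank run
def pvCollapse : List String → List String
  | [] => []
  | l :: rest =>
    if pvIsBlank l then
      l :: pvCollapse (rest.dropWhile pvIsBlank)
    else
      l :: (rest.takeWhile (fun x => !pvIsBlank x) ++ pvCollapse (rest.dropWhile (fun x => !pvIsBlank x)))
  termination_by xs => xs.length
  decreasing_by
  · exact Nat.lt_succ_of_le (rest.length_dropWhile_le pvIsBlank)
  · exact Nat.lt_succ_of_le (rest.length_dropWhile_le _)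

def strip_comment_lines_alt (code : String) : String :=
  let lines := ((PySem.Str.split? code "\n").getD []).filter
    (fun l => !PySem.Str.startswith (PySem.Str.strip l) "//")
  PySem.Str.strip (PySem.Str.join "\n" (pvCollapse lines))

-- ===== PRECONDITION & SPEC =====
def Spec_strip_comment_lines (code : String) (out : String) : Prop := out = strip_comment_lines_alt code
instance (code : String) (out : String) : Decidable (Spec_strip_comment_lines code out) := by unfold Spec_strip_comment_lines; infer_instance

-- ===== CLAIM (what is proved, stated in full; the proofs are below) =====
def Claim_equal_strip_comment_lines : Prop := ∀ (code : String), Dom_strip_comment_lines code → Spec_strip_comment_lines code (strip_comment_lines code)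

-- ===== LEMMAS AND PROOFS =====

-- proof helper: A's loop after the comment lines are gone (state = prev_blank)
def pvCollapseP : List String → Bool → List String
  | [], _ => []
  | l :: rest, prev =>
    if pvIsBlank l && prev then pvCollapseP rest prev
    else l :: pvCollapseP rest (pvIsBlank l)

theorem pvLoopA_eq_collapseP (ls : List String) (prev : Bool) :
    pvLoopA ls prev
      = pvCollapseP (ls.filter (fun l => !PySem.Str.startswith (PySem.Str.strip l) "//")) prev := by
  induction ls generalizing prev with
  | nil => rfl
  | cons l rest ih =>
    simp only [pvLoopA, List.filter_cons]
    cases hc : PySem.Str.startswith (PySem.Str.strip l) "//" with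
    | true =>
      simp only [Bool.not_true, Bool.false_eq_true, if_false, if_true, ih]
    | false =>
      simp only [Bool.not_false, if_true, Bool.false_eq_true, if_false, ih,
        pvCollapseP, pvIsBlank]

theorem pvCollapseP_true (xs : List String) :
    pvCollapseP xs true = pvCollapseP (xs.dropWhile pvIsBlank) false := by
  induction xs with
  | nil => rfl
  | cons l rest ih =>
    by_cases hb : pvIsBlank l = true
    · simp [pvCollapseP, hb, ih]
    · simp only [Bool.not_eq_true] at hb
      simp [pvCollapseP, hb]

theorem pvCollapse_run (rest : List String) :
    rest.takeWhile (fun x => !pvIsBlank x) ++ pvCollapse (rest.dropWhile (fun x => !pvIsBlank x))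
      = pvCollapse rest := by
  cases rest with
  | nil => rfl
  | cons r rs =>
    by_cases hb : pvIsBlank r = true
    · simp [hb]
    · simp only [Bool.not_eq_true] at hb
      simp [hb, pvCollapse]

theorem pvCollapseP_eq_collapse (n : Nat) :
    ∀ xs : List String, xs.length ≤ n → pvCollapseP xs false = pvCollapse xs := by
  induction n with
  | zero =>
    intro xs h
    have hx : xs = [] := List.eq_nil_of_length_eq_zero (Nat.le_zero.mp h)
    subst hx; simp [pvCollapseP, pvCollapse]
  | succ n ih =>
    intro xs h
    cases xs with
    | nil => simp [pvCollapseP, pvCollapse]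
    | cons l rest =>
      by_cases hb : pvIsBlank l = true
      · have h1 : pvCollapseP (l :: rest) false = l :: pvCollapseP rest true := by
          simp [pvCollapseP, hb]
        rw [h1, pvCollapseP_true,
          ih _ (Nat.le_trans (Nat.succ_le_succ (rest.length_dropWhile_le pvIsBlank))
            h |> Nat.le_of_succ_le_succ)]
        simp [pvCollapse, hb]
      · simp only [Bool.not_eq_true] at hb
        have h1 : pvCollapseP (l :: rest) false = l :: pvCollapseP rest false := by
          simp [pvCollapseP, hb]
        rw [h1, ih rest (Nat.le_of_succ_le_succ h)]
        rw [show pvCollapse (l :: rest)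
            = l :: (rest.takeWhile (fun x => !pvIsBlank x)
                ++ pvCollapse (rest.dropWhile (fun x => !pvIsBlank x))) by
          simp [pvCollapse, hb]]
        rw [pvCollapse_run]

-- ===== VERDICT (by name: the statement is the Claim_ definition above) =====
theorem strip_comment_lines_spec : Claim_equal_strip_comment_lines := by
  intro code _
  unfold Spec_strip_comment_lines strip_comment_lines strip_comment_lines_alt
  rw [pvLoopA_eq_collapseP, pvCollapseP_eq_collapse (xs := _) _ (Nat.le_refl _)]
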